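-- pv_equiv track=rewrite | github.com/j3r3miah/InterviewPractice | dynamic_programming.py | permutations_no_dupes
-- ===== SOURCE A (Python) =====
-- def permutations_no_dupes(s):
--     # return all permutations of string of non-unique chars
--     if len(s) == 0:
--         return []
--     if len(s) == 1:
--         return [s]
--     rv = []
--     seen = set()
--     for i, c in enumerate(s):
--         if c in seen:
--             continue
--         ss = s[:i] + s[i+1:]
--         for sp in permutations_no_dupes(ss):
--             rv.append(c + sp)
--         seen.add(c)
--     return rv
-- ===== SOURCE B (Python) =====
-- def permutations_no_dupes(s):
--     # Iterative breadth-first construction instead of A's recursion: keep a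
--     # worklist of (prefix, remaining) pairs and expand it len(s) times, taking
--     # each distinct character of `remaining` (first occurrence) as next letter.
--     if len(s) == 0:
--         return []
--     level = [("", s)]
--     for _ in range(len(s)):
--         nxt = []
--         for prefix, rest in level:
--             seen = set()
--             for i, c in enumerate(rest):
--                 if c not in seen:
--                     seen.add(c)
--                     nxt.append((prefix + c, rest[:i] + rest[i + 1:]))
--         level = nxt
--     return [prefix for prefix, _ in level]
-- ===== Notes on version B (the rewrite author's own statement) =====
-- stated objective: alternative
-- what changed: A builds the result by depth-first recursion (recursive calls on the string minus one character); B is iterative: a breadth-first worklist of (prefix, remaining) pairs expanded len(s) times, with the answers read off the final level.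
import Mathlib
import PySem

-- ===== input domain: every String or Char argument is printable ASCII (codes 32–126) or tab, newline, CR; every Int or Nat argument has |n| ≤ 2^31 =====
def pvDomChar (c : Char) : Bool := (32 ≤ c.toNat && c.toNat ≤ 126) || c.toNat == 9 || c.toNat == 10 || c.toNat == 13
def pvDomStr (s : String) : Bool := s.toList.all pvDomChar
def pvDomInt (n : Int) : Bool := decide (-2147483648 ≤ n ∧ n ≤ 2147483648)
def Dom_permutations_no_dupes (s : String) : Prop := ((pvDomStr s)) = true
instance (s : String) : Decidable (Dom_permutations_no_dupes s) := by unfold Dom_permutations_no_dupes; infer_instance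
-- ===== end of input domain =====

-- B replaces A's recursion by an iterative breadth-first worklist of
-- (prefix, remaining) pairs, expanded len(s) times; same return value, no speed claim.

-- ===== PORT A =====
-- Strings are modelled on their character lists (PySem convention); String.ofList is
-- applied once at the end.  The loop 'for i, c in enumerate(s)' is transliterated
-- with the maintained split s = pre ++ c :: post, so that pre = s[:i] and
-- post = s[i+1:] are exactly the slices A computes (i in range, hence exact).
mutual
def pvALoop (pre post : List Char) (rv : List (List Char)) (seen : PySem.Set Char) :
    List (List Char) :=
  match post with
  | [] => rv
  | c :: rest =>
    if PySem.Set.contains seen c then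
      pvALoop (pre ++ [c]) rest rv seen                 -- 'if c in seen: continue'
    else
      pvALoop (pre ++ [c]) rest
        (rv ++ (permutations_no_dupes_core (pre ++ rest)).map (fun sp => c :: sp))
        (PySem.Set.add seen c)
  termination_by (pre.length + post.length, post.length + 1)
  decreasing_by all_goals (simp [Prod.lex_def, List.length_append]; try omega)

def permutations_no_dupes_core (l : List Char) : List (List Char) :=
  if l.length = 0 then []
  else if l.length = 1 then [l]
  else pvALoop [] l [] (PySem.Set.ofList [])
  termination_by (l.length, l.length + 2)
  decreasing_by all_goals (simp [Prod.lex_def]; try omega)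
end

def permutations_no_dupes (s : String) : List String :=
  (permutations_no_dupes_core s.toList).map (fun cs => String.ofList cs)

-- ===== PORT B =====
-- the inner loop 'for i, c in enumerate(rest): if c not in seen: …' of one
-- (prefix, rest) pair, again with the maintained split rest = pre ++ c :: rest'
-- (so pre = rest[:i], rest' = rest[i+1:], exactly the slices B computes)
def pvExpandLoop (pfx : List Char) (pre rest : List Char) (seen : PySem.Set Char)
    (nxt : List (List Char × List Char)) : List (List Char × List Char) :=
  match rest with
  | [] => nxt
  | c :: rest' =>
    if PySem.Set.contains seen c then
      pvExpandLoop pfx (pre ++ [c]) rest' seen nxt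
    else
      pvExpandLoop pfx (pre ++ [c]) rest' (PySem.Set.add seen c)
        (nxt ++ [(pfx ++ [c], pre ++ rest')])

-- one round of 'nxt = []; for prefix, rest in level: …; level = nxt'
def pvNext (level : List (List Char × List Char)) : List (List Char × List Char) :=
  level.foldl (fun nxt pr => pvExpandLoop pr.1 [] pr.2 (PySem.Set.ofList []) nxt) []

-- 'for _ in range(len(s)):' as a counted recursion
def pvLevels (k : Nat) (level : List (List Char × List Char)) :
    List (List Char × List Char) :=
  match k with
  | 0 => level
  | Nat.succ k' => pvLevels k' (pvNext level)

def permutations_no_dupes_alt (s : String) : List String :=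
  if PySem.Str.len s == 0 then []
  else (pvLevels s.toList.length [([], s.toList)]).map (fun pr => String.ofList pr.1)

-- ===== PRECONDITION & SPEC =====
def Spec_permutations_no_dupes (s : String) (out : List String) : Prop := out = permutations_no_dupes_alt s
instance (s : String) (out : List String) : Decidable (Spec_permutations_no_dupes s out) := by unfold Spec_permutations_no_dupes; infer_instance

-- ===== CLAIM (what is proved, stated in full; the proofs are below) =====
def Claim_equal_permutations_no_dupes : Prop := ∀ (s : String), Dom_permutations_no_dupes s → Spec_permutations_no_dupes s (permutations_no_dupes s)

-- ===== LEMMAS AND PROOFS =====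

-- accumulator-stripping lemmas for the two loops
theorem pvALoop_acc (post : List Char) : ∀ (pre : List Char) (rv : List (List Char))
    (seen : PySem.Set Char), pvALoop pre post rv seen = rv ++ pvALoop pre post [] seen := by
  induction post with
  | nil => intro pre rv seen; rw [pvALoop, pvALoop]; simp
  | cons c rest ih =>
    intro pre rv seen
    rw [pvALoop]
    conv_rhs => rw [pvALoop]
    by_cases h : PySem.Set.contains seen c = true
    · simp only [h, if_true]; exact ih _ rv seen
    · simp only [h, if_false, Bool.false_eq_true]
      rw [ih _ (rv ++ _), ih _ ([] ++ _)]
      simp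

theorem pvExpandLoop_acc (rest : List Char) : ∀ (pfx pre : List Char)
    (seen : PySem.Set Char) (nxt : List (List Char × List Char)),
    pvExpandLoop pfx pre rest seen nxt = nxt ++ pvExpandLoop pfx pre rest seen [] := by
  induction rest with
  | nil => intro pfx pre seen nxt; rw [pvExpandLoop, pvExpandLoop]; simp
  | cons c rest' ih =>
    intro pfx pre seen nxt
    rw [pvExpandLoop]
    conv_rhs => rw [pvExpandLoop]
    by_cases h : PySem.Set.contains seen c = true
    · simp only [h, if_true]; exact ih _ _ seen nxt
    · simp only [h, if_false, Bool.false_eq_true]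
      rw [ih _ _ _ (nxt ++ _), ih _ _ _ ([] ++ _)]
      simp

-- every pair produced by the inner loop has a remainder one character shorter
theorem pvExpandLoop_len (rest : List Char) : ∀ (pfx pre : List Char)
    (seen : PySem.Set Char) (pr : List Char × List Char),
    pr ∈ pvExpandLoop pfx pre rest seen [] → pr.2.length + 1 = pre.length + rest.length := by
  induction rest with
  | nil => intro pfx pre seen pr h; rw [pvExpandLoop] at h; exact absurd h (by simp)
  | cons c rest' ih =>
    intro pfx pre seen pr h
    rw [pvExpandLoop] at h
    by_cases hc : PySem.Set.contains seen c = true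
    · rw [if_pos hc] at h
      have := ih pfx (pre ++ [c]) seen pr h
      simp at this ⊢
      omega
    · rw [if_neg hc, pvExpandLoop_acc] at h
      rcases List.mem_append.mp h with h | h
      · have : pr = (pfx ++ [c], pre ++ rest') := by simpa using h
        subst this
        simp
        omega
      · have := ih pfx (pre ++ [c]) _ pr h
        simp at this ⊢
        omega

-- the value A's recursion returns, extended to the empty remainder
def pvCoreExt (r : List Char) : List (List Char) :=
  if r = [] then [[]] else permutations_no_dupes_core r

-- one round of B's expansion, flat-mapped through the remaining work, is one
-- unfolding of A's loop
theorem pvExpand_vs_ALoop (post : List Char) : ∀ (pre : List Char)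
    (seen : PySem.Set Char) (p : List Char), 2 ≤ pre.length + post.length →
    (pvExpandLoop p pre post seen []).flatMap
        (fun pr => (pvCoreExt pr.2).map (fun q => pr.1 ++ q))
      = (pvALoop pre post [] seen).map (fun q => p ++ q) := by
  induction post with
  | nil =>
    intro pre seen p _
    rw [pvExpandLoop, pvALoop]
    simp
  | cons c post' ih =>
    intro pre seen p h2
    rw [pvExpandLoop, pvALoop]
    by_cases hc : PySem.Set.contains seen c = true
    · rw [if_pos hc, if_pos hc]
      exact ih (pre ++ [c]) seen p (by simp at h2 ⊢; omega)
    · rw [if_neg hc, if_neg hc, pvExpandLoop_acc, pvALoop_acc]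
      have hne : pre ++ post' ≠ [] := by
        intro h0
        have : pre.length + post'.length = 0 := by
          rw [← List.length_append, h0]; rfl
        simp at h2
        omega
      rw [List.flatMap_append, List.map_append]
      congr 1
      · simp only [List.flatMap_cons, List.flatMap_nil, List.append_nil,
          pvCoreExt, if_neg hne, List.nil_append, List.map_map]
        apply List.map_congr_left
        intro q _
        simp
      · exact ih (pre ++ [c]) _ p (by simp at h2 ⊢; omega)

-- one worklist round is the concatenation of the per-pair expansions
theorem pvNext_eq (level : List (List Char × List Char)) :
    pvNext level
      = level.flatMap (fun pr => pvExpandLoop pr.1 [] pr.2 (PySem.Set.ofList []) []) := by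
  unfold pvNext
  have h : (fun (nxt : List (List Char × List Char)) (pr : List Char × List Char) =>
      pvExpandLoop pr.1 [] pr.2 (PySem.Set.ofList []) nxt)
      = fun nxt pr => nxt ++ pvExpandLoop pr.1 [] pr.2 (PySem.Set.ofList []) [] := by
    funext nxt pr
    exact pvExpandLoop_acc _ _ _ _ _
  rw [h, PySem.List.foldl_append_eq_flatMap]
  simp

-- expanding one pair and finishing equals A's value under that prefix
theorem pvExpand_pair (p r : List Char) (hne : r ≠ []) :
    (pvExpandLoop p [] r (PySem.Set.ofList []) []).flatMap
        (fun pr => (pvCoreExt pr.2).map (fun q => pr.1 ++ q))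
      = (pvCoreExt r).map (fun q => p ++ q) := by
  obtain ⟨a, r', rfl⟩ := List.exists_cons_of_ne_nil hne
  by_cases h1 : r' = []
  · subst h1
    rw [pvExpandLoop]
    norm_num
    rw [pvExpandLoop]
    simp [pvCoreExt, permutations_no_dupes_core]
  · have h2 : 2 ≤ ([] : List Char).length + (a :: r').length := by
      cases r' with
      | nil => exact absurd rfl h1
      | cons b r'' => simp
    rw [pvExpand_vs_ALoop (a :: r') [] (PySem.Set.ofList []) p h2]
    have : pvCoreExt (a :: r') = pvALoop [] (a :: r') [] (PySem.Set.ofList []) := by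
      rw [pvCoreExt, if_neg (by simp), permutations_no_dupes_core]
      have hl0 : (a :: r').length ≠ 0 := by simp
      have hl1 : (a :: r').length ≠ 1 := by
        simp only [List.length_cons]
        intro h0
        have h0' : r'.length = 0 := by omega
        cases r' with
        | nil => exact h1 rfl
        | cons b r'' => simp at h0'
      simp only [hl0, hl1, if_false]
    rw [this]

-- the breadth-first worklist, run to completion, computes A's value
theorem pvLevels_char (k : Nat) : ∀ (level : List (List Char × List Char)),
    (∀ pr ∈ level, pr.2.length = k) →
    (pvLevels k level).map Prod.fst
      = level.flatMap (fun pr => (pvCoreExt pr.2).map (fun q => pr.1 ++ q)) := by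
  induction k with
  | zero =>
    intro level h
    rw [pvLevels]
    induction level with
    | nil => simp
    | cons pr rest ihl =>
      have hpr : pr.2 = [] := by
        have := h pr (by simp)
        simpa using this
      rw [List.flatMap_cons, List.map_cons,
          ihl (fun q hq => h q (by simp [hq]))]
      simp [hpr, pvCoreExt]
  | succ k' ihk =>
    intro level h
    rw [pvLevels]
    have hlen : ∀ pr ∈ pvNext level, pr.2.length = k' := by
      intro pr hpr
      rw [pvNext_eq] at hpr
      obtain ⟨pr0, hpr0, hmem⟩ := List.mem_flatMap.mp hpr
      have := pvExpandLoop_len pr0.2 pr0.1 [] (PySem.Set.ofList []) pr hmem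
      have h0 := h pr0 hpr0
      simp at this
      omega
    rw [ihk (pvNext level) hlen, pvNext_eq, List.flatMap_assoc]
    apply List.flatMap_congr
    intro pr hpr
    have hne : pr.2 ≠ [] := by
      intro h0
      have := h pr hpr
      rw [h0] at this
      simp at this
    exact pvExpand_pair pr.1 pr.2 hne

-- ===== VERDICT (by name: the statement is the Claim_ definition above) =====
theorem permutations_no_dupes_spec : Claim_equal_permutations_no_dupes := by
  intro s _
  show permutations_no_dupes s = permutations_no_dupes_alt s
  rw [permutations_no_dupes, permutations_no_dupes_alt]
  cases h : s.toList with
  | nil =>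
    have hlen : PySem.Str.len s == 0 := by simp [PySem.Str.len_eq, h]
    rw [if_pos hlen, permutations_no_dupes_core]
    simp
  | cons a l' =>
    have hlen : ¬ (PySem.Str.len s == 0) = true := by
      simp [PySem.Str.len_eq, h]
      omega
    rw [if_neg hlen]
    have hchar := pvLevels_char (a :: l').length [([], a :: l')] (by simp)
    have hsingle : ([([], a :: l')] : List (List Char × List Char)).flatMap
        (fun pr => (pvCoreExt pr.2).map (fun q => pr.1 ++ q))
        = permutations_no_dupes_core (a :: l') := by
      simp [pvCoreExt]
    rw [show (fun pr : List Char × List Char => String.ofList pr.1)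
          = (fun cs => String.ofList cs) ∘ Prod.fst from rfl,
        ← List.map_map, hchar, hsingle]
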